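-- pv_equiv track=rewrite | github.com/opendatalab/OmniDocBench | src/metrics/cdm/modules/tokenize_latex/tokenize_latex.py | _merge_left_right
-- ===== SOURCE A (Python) =====
-- def _merge_left_right(post: str) -> str:
--     if "\\left" not in post and "\\right" not in post:
--         return post
--     tokens = post.strip().split()
--     merged: list[str] = []
--     i = 0
--     while i < len(tokens):
--         tok = tokens[i]
--         if tok in {r"\left", r"\right"} and i + 1 < len(tokens):
--             merged.append(tok + tokens[i + 1])
--             i += 2
--             continue
--         merged.append(tok)
--         i += 1
--     return " ".join(merged)
-- ===== SOURCE B (Python) =====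
-- def _merge_left_right(post: str) -> str:
--     if "\\left" not in post and "\\right" not in post:
--         return post
--
--     def go(ts, pending):
--         if not ts:
--             return [pending] if pending is not None else []
--         t, rest = ts[0], ts[1:]
--         if pending is not None:
--             return [pending + t] + go(rest, None)
--         if t in ("\\left", "\\right"):
--             return go(rest, t)
--         return [t] + go(rest, None)
--
--     return " ".join(go(post.strip().split(), None))
-- ===== Notes on version B (the rewrite author's own statement) =====
-- stated objective: alternative
-- what changed: Replaces A's index-based while loop with skip-by-two steps by structural recursion over the token list carrying an optional pending delimiter token that is fused with the next token.
import Mathlib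
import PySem

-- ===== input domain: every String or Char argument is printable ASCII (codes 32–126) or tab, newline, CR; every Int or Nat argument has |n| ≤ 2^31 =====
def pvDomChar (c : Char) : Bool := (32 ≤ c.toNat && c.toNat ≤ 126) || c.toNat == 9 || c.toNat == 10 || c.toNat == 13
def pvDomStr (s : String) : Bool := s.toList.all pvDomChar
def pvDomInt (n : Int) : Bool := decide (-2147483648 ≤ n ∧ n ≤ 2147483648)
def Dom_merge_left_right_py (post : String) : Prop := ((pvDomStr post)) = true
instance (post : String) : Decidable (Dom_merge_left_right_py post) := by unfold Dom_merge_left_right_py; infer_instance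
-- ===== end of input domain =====

-- B replaces A's index-stepping while loop by structural recursion with a pending-token state (objective: alternative decomposition).

-- ===== PORT A =====
-- literal port of A's while loop: index i, accumulator merged, skip by 2 after a merge
def mergeLoopA (tokens : List String) (i : Nat) (merged : List String) : List String :=
  if i < tokens.length then
    let tok := tokens.getD i ""
    if (tok = "\\left" ∨ tok = "\\right") ∧ i + 1 < tokens.length then
      mergeLoopA tokens (i + 2) (merged ++ [tok ++ tokens.getD (i + 1) ""])
    else
      mergeLoopA tokens (i + 1) (merged ++ [tok])
  else merged
termination_by tokens.length - i

def merge_left_right_py (post : String) : String :=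
  if ¬ (PySem.Str.isIn "\\left" post) ∧ ¬ (PySem.Str.isIn "\\right" post) then post
  else
    let tokens := PySem.Str.split₀ (PySem.Str.strip post)
    PySem.Str.join " " (mergeLoopA tokens 0 [])

-- ===== PORT B =====
-- literal port of B's recursive go(ts, pending)
def mergeGoB : List String → Option String → List String
  | [], some p => [p]
  | [], none => []
  | t :: rest, some p => (p ++ t) :: mergeGoB rest none
  | t :: rest, none =>
    if t = "\\left" ∨ t = "\\right" then mergeGoB rest (some t)
    else t :: mergeGoB rest none

def merge_left_right_py_alt (post : String) : String :=
  if ¬ (PySem.Str.isIn "\\left" post) ∧ ¬ (PySem.Str.isIn "\\right" post) then post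
  else PySem.Str.join " " (mergeGoB (PySem.Str.split₀ (PySem.Str.strip post)) none)

-- ===== PRECONDITION & SPEC =====
def Spec_merge_left_right_py (post : String) (out : String) : Prop := out = merge_left_right_py_alt post
instance (post : String) (out : String) : Decidable (Spec_merge_left_right_py post out) := by unfold Spec_merge_left_right_py; infer_instance

-- ===== CLAIM (what is proved, stated in full; the proofs are below) =====
def Claim_equal_merge_left_right_py : Prop := ∀ (post : String), Dom_merge_left_right_py post → Spec_merge_left_right_py post (merge_left_right_py post)

-- ===== LEMMAS AND PROOFS =====
-- A's index loop from position i equals B's recursion on the remaining suffix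
theorem mergeLoopA_eq_goB (tokens : List String) (i : Nat) (merged : List String) :
    mergeLoopA tokens i merged = merged ++ mergeGoB (tokens.drop i) none := by
  fun_induction mergeLoopA tokens i merged with
  | case1 i merged hi tok hcond ih =>
    have h1 : i + 1 < tokens.length := hcond.2
    rw [ih, List.drop_eq_getElem_cons hi, List.drop_eq_getElem_cons h1]
    have htok : tokens[i] = tok := by simp [tok, List.getD_eq_getElem?_getD, hi]
    have hnext : tokens[i+1] = tokens.getD (i + 1) "" := by
      simp [List.getD_eq_getElem?_getD, h1]
    rw [htok, ← hnext]
    rcases hcond.1 with h | h <;> simp [mergeGoB, h]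
  | case2 i merged hi tok hcond ih =>
    rw [ih, List.drop_eq_getElem_cons hi]
    have htok : tokens[i] = tok := by simp [tok, List.getD_eq_getElem?_getD, hi]
    rw [htok]
    by_cases hlr : tok = "\\left" ∨ tok = "\\right"
    · have hlen : ¬ i + 1 < tokens.length := fun h => hcond ⟨hlr, h⟩
      have hdrop : tokens.drop (i + 1) = [] := by
        rw [List.drop_eq_nil_iff]; omega
      rw [hdrop]
      rcases hlr with h | h <;> simp [mergeGoB, h]
    · push Not at hlr
      simp [mergeGoB, hlr.1, hlr.2]
  | case3 i merged hi =>
    have hdrop : tokens.drop i = [] := by rw [List.drop_eq_nil_iff]; omega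
    simp [hdrop, mergeGoB]

-- ===== VERDICT (by name: the statement is the Claim_ definition above) =====
theorem merge_left_right_py_spec : Claim_equal_merge_left_right_py := by
  intro post _
  unfold Spec_merge_left_right_py merge_left_right_py merge_left_right_py_alt
  split
  · rfl
  · show PySem.Str.join " " (mergeLoopA (PySem.Str.split₀ (PySem.Str.strip post)) 0 []) = _
    rw [mergeLoopA_eq_goB, List.nil_append, List.drop_zero]
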